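-- pv_equiv track=rewrite | github.com/FireSpirit171/TMO | tinkoff/main.py | find_three_powers_of_two
-- ===== SOURCE A (Python) =====
-- def find_three_powers_of_two(a):
--     powers = []
--     power = 1
--
--     while power <= a:
--         if power & a:
--             powers.append(power)
--         power <<= 1
--
--     if len(powers) < 3:
--         return -1
--
--     return sum(sorted(powers, reverse=True)[:3])
-- ===== SOURCE B (Python) =====
-- def find_three_powers_of_two(a):
--     total = 0
--     rest = a
--     for _ in range(3):
--         if rest <= 0:
--             return -1
--         high = 1 << (rest.bit_length() - 1)
--         total += high
--         rest -= high
--     return total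
-- ===== Notes on version B (the rewrite author's own statement) =====
-- stated objective: alternative
-- what changed: B extracts only the three highest set bits top-down (bit_length gives each highest power, which is subtracted) with an early -1 return, instead of scanning every bit position bottom-up, collecting all set bits and sorting.
import Mathlib
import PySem

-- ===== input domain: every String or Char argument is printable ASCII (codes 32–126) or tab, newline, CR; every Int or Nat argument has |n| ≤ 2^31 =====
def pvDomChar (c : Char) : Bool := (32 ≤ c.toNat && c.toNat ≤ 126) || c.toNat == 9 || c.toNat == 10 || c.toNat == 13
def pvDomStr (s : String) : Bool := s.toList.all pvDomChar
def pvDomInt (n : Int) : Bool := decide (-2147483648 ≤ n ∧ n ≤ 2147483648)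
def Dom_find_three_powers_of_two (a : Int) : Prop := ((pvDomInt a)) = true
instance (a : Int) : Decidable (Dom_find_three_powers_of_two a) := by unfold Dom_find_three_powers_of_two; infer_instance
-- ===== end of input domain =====

-- B extracts only the three highest set bits top-down (bit_length gives each
-- highest power of two, which is subtracted), with an early -1 return, instead
-- of scanning every bit position bottom-up, collecting all set bits and sorting.

-- ===== PORT A =====
-- helper lemma cited by the port's termination/positivity proofs: p <<< 1 = 2 * p
theorem pvShl1 (p : Int) : p <<< (1 : Nat) = 2 * p := by rw [Int.shiftLeft_eq]; ring

-- while power <= a: if power & a: powers.append(power); power <<= 1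
def pvALoop (a power : Int) (hp : 0 < power) (powers : List Int) : List Int :=
  if _h : power ≤ a then
    pvALoop a (power <<< (1 : Nat)) (by rw [pvShl1]; omega)
      (if PySem.Int.band power a ≠ 0 then powers ++ [power] else powers)
  else powers
termination_by (a + 1 - power).toNat
decreasing_by rw [pvShl1]; omega

def find_three_powers_of_two (a : Int) : Int :=
  let powers := pvALoop a 1 (by omega) []
  if powers.length < 3 then -1
  else (PySem.List.slice (PySem.List.sorted powers (fun x => x) true) none (some 3)).sum

-- ===== PORT B =====
-- for _ in range(3): if rest <= 0: return -1; high = 1 << (rest.bit_length()-1); …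
-- rest.bit_length() for rest > 0 is ported as rest.toNat.log2 + 1 (the library call)
def pvBTake : Nat → Int → Int → Int
  | 0, _, total => total
  | k+1, rest, total =>
    if rest ≤ 0 then -1
    else
      let bitLen : Nat := rest.toNat.log2 + 1
      let high : Int := ((1 <<< (bitLen - 1) : Nat) : Int)
      pvBTake k (rest - high) (total + high)

def find_three_powers_of_two_alt (a : Int) : Int := pvBTake 3 a 0

-- ===== PRECONDITION & SPEC =====
def Spec_find_three_powers_of_two (a : Int) (out : Int) : Prop := out = find_three_powers_of_two_alt a
instance (a : Int) (out : Int) : Decidable (Spec_find_three_powers_of_two a out) := by unfold Spec_find_three_powers_of_two; infer_instance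

-- ===== CLAIM (what is proved, stated in full; the proofs are below) =====
def Claim_equal_find_three_powers_of_two : Prop := ∀ (a : Int), Dom_find_three_powers_of_two a → Spec_find_three_powers_of_two a (find_three_powers_of_two a)

-- ===== LEMMAS AND PROOFS =====

-- proof machinery: the ascending list of set-bit powers of n (lowest-bit peeling)
theorem pvBandLt (a : Int) (h : 0 < a) : (PySem.Int.band a (a - 1)).toNat < a.toNat := by
  rw [PySem.Int.band_of_nonneg (by omega) (by omega)]
  have h1 : a.toNat &&& (a - 1).toNat ≤ (a - 1).toNat := Nat.and_le_right
  omega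

def pvBits (a : Int) (powers : List Int) : List Int :=
  if _h : 0 < a then
    pvBits (PySem.Int.band a (a - 1)) (powers ++ [a - PySem.Int.band a (a - 1)])
  else powers
termination_by a.toNat
decreasing_by exact pvBandLt a _h

theorem pvAndDouble (p b : Nat) : (2*p) &&& b = 2*(p &&& (b/2)) := by
  apply Nat.eq_of_testBit_eq
  intro i
  cases i with
  | zero => simp only [Nat.testBit_zero]; simp [Nat.mul_mod_right]
  | succ j => simp [Nat.testBit_add_one, Nat.and_div_two]

theorem pvALoop_acc2 (k : Nat) : ∀ (a power : Int) (hp : 0 < power) (acc2 acc1 : List Int),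
    (a + 1 - power).toNat ≤ k →
    pvALoop a power hp (acc1 ++ acc2) = acc1 ++ pvALoop a power hp acc2 := by
  induction k with
  | zero =>
    intro a power hp acc2 acc1 hk
    have hna : ¬ power ≤ a := by omega
    rw [pvALoop.eq_def, dif_neg hna, pvALoop, dif_neg hna]
  | succ k ih =>
    intro a power hp acc2 acc1 hk
    by_cases h : power ≤ a
    · rw [pvALoop.eq_def, dif_pos h]
      conv_rhs => rw [pvALoop.eq_def]
      rw [dif_pos h]
      rw [show (if PySem.Int.band power a ≠ 0 then (acc1 ++ acc2) ++ [power] else acc1 ++ acc2)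
          = acc1 ++ (if PySem.Int.band power a ≠ 0 then acc2 ++ [power] else acc2) by split <;> simp]
      exact ih a _ _ _ acc1 (by rw [pvShl1]; omega)
    · rw [pvALoop.eq_def, dif_neg h, pvALoop, dif_neg h]

theorem pvALoop_acc (a power : Int) (hp : 0 < power) (acc : List Int) :
    pvALoop a power hp acc = acc ++ pvALoop a power hp [] := by
  simpa using pvALoop_acc2 (a + 1 - power).toNat a power hp [] acc le_rfl

theorem pvBits_acc2 (k : Nat) : ∀ (a : Int) (acc2 acc1 : List Int), a.toNat ≤ k →
    pvBits a (acc1 ++ acc2) = acc1 ++ pvBits a acc2 := by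
  induction k with
  | zero =>
    intro a acc2 acc1 hk
    have hna : ¬ 0 < a := by omega
    rw [pvBits.eq_def, dif_neg hna, pvBits, dif_neg hna]
  | succ k ih =>
    intro a acc2 acc1 hk
    by_cases h : 0 < a
    · rw [pvBits.eq_def, dif_pos h]
      conv_rhs => rw [pvBits.eq_def]
      rw [dif_pos h]
      rw [show (acc1 ++ acc2) ++ [a - PySem.Int.band a (a-1)]
          = acc1 ++ (acc2 ++ [a - PySem.Int.band a (a-1)]) by simp]
      exact ih _ _ acc1 (by have := pvBandLt a h; omega)
    · rw [pvBits.eq_def, dif_neg h, pvBits, dif_neg h]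

theorem pvBits_acc (a : Int) (acc : List Int) :
    pvBits a acc = acc ++ pvBits a [] := by
  simpa using pvBits_acc2 a.toNat a [] acc le_rfl

theorem pvBandNat (m k : Nat) : PySem.Int.band (m : Int) (k : Int) = ((m &&& k : Nat) : Int) := by
  simp

theorem pvALoop_double (k : Nat) : ∀ (m p c : Nat), c ≤ 1 → m + 1 ≤ p + k →
    ∀ (h1 : (0:Int) < ((2*p : Nat) : Int)) (h2 : (0:Int) < (p : Int)),
    pvALoop ((2*m+c : Nat) : Int) ((2*p : Nat) : Int) h1 [] =
      (pvALoop (m : Int) (p : Int) h2 []).map (fun x => 2*x) := by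
  induction k with
  | zero =>
    intro m p c hc hk h1 h2
    rw [pvALoop.eq_def, dif_neg (by push_cast; omega), pvALoop, dif_neg (by omega)]
    simp
  | succ k ih =>
    intro m p c hc hk h1 h2
    have hp : 0 < p := by exact_mod_cast h2
    by_cases h : p ≤ m
    · rw [pvALoop.eq_def, dif_pos (by push_cast; omega)]
      conv_rhs => rw [pvALoop.eq_def]
      rw [dif_pos (by exact_mod_cast h)]
      have hdiv : (2*m+c)/2 = m := by omega
      have hband : PySem.Int.band ((2*p : Nat) : Int) ((2*m+c : Nat) : Int)
          = ((2*(p &&& m) : Nat) : Int) := by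
        rw [pvBandNat, pvAndDouble, hdiv]
      have hband2 : PySem.Int.band (p : Int) (m : Int) = ((p &&& m : Nat) : Int) := pvBandNat p m
      rw [hband, hband2]
      simp only [pvShl1]
      simp only [show (2 * ((2*p : Nat) : Int)) = ((2*(2*p) : Nat) : Int) from by push_cast; ring,
                 show (2 * ((p : Nat) : Int)) = ((2*p : Nat) : Int) from by push_cast; ring]
      rw [pvALoop_acc, pvALoop_acc]
      rw [ih m (2*p) c hc (by omega) (by push_cast; omega) (by push_cast; omega)]
      by_cases hb : (p &&& m) = 0
      · simp [hb]
      · rw [if_pos (by push_cast; omega), if_pos (by omega)]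
        rw [pvALoop_acc _ _ _ ([] ++ [(p : Int)])]
        simp
    · rw [pvALoop.eq_def, dif_neg (by push_cast; omega), pvALoop, dif_neg (by exact_mod_cast h)]
      simp

theorem pvBits_double (r : Nat) :
    pvBits ((2*r : Nat) : Int) [] = (pvBits (r : Int) []).map (fun x => 2*x) := by
  induction r using Nat.strong_induction_on with
  | _ r ih =>
    rcases Nat.eq_zero_or_pos r with hr | hr
    · subst hr
      rw [pvBits.eq_def, dif_neg (by norm_num)]
      simp
    · have hband : PySem.Int.band ((2*r : Nat) : Int) (((2*r : Nat) : Int) - 1)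
          = ((2*(r &&& (r-1)) : Nat) : Int) := by
        rw [show (((2*r : Nat) : Int) - 1) = (((2*r-1 : Nat)) : Int) by push_cast [hr]; omega]
        rw [pvBandNat, pvAndDouble, show (2*r-1)/2 = r-1 by omega]
      have hband2 : PySem.Int.band (r : Int) ((r : Int) - 1) = ((r &&& (r-1) : Nat) : Int) := by
        rw [show ((r : Int) - 1) = (((r-1 : Nat)) : Int) by push_cast [hr]; omega]
        exact pvBandNat _ _
      have hlt : r &&& (r-1) < r := by
        have : r &&& (r-1) ≤ r - 1 := Nat.and_le_right
        omega
      rw [pvBits.eq_def, dif_pos (by push_cast; omega), hband, pvBits_acc]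
      conv_rhs => rw [pvBits.eq_def]
      rw [dif_pos (by omega), hband2,
          pvBits_acc _ ([] ++ [(r : Int) - ((r &&& (r-1) : Nat) : Int)])]
      rw [ih (r &&& (r-1)) hlt]
      simp only [List.nil_append, List.map_append, List.map_cons, List.map_nil]
      congr 1
      push_cast
      ring_nf

theorem pvBits_odd (m : Nat) :
    pvBits ((2*m+1 : Nat) : Int) [] = 1 :: pvBits ((2*m : Nat) : Int) [] := by
  have hband : PySem.Int.band ((2*m+1 : Nat) : Int) (((2*m+1 : Nat) : Int) - 1)
      = ((2*m : Nat) : Int) := by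
    rw [show (((2*m+1 : Nat) : Int) - 1) = ((2*m : Nat) : Int) by push_cast; ring]
    rw [pvBandNat, Nat.and_comm, pvAndDouble, show (2*m+1)/2 = m by omega, Nat.and_self]
  rw [pvBits.eq_def, dif_pos (by push_cast; omega), hband,
      pvBits_acc _ ([] ++ [((2*m+1 : Nat) : Int) - ((2*m : Nat) : Int)])]
  rw [show ((2*m+1 : Nat) : Int) - ((2*m : Nat) : Int) = 1 by push_cast; ring]
  simp

theorem pvLoop_eq (n : Nat) :
    ∀ (h1 : (0:Int) < 1), pvALoop (n : Int) 1 h1 [] = pvBits (n : Int) [] := by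
  induction n using Nat.strong_induction_on with
  | _ n ih =>
    intro h1
    rcases Nat.eq_zero_or_pos n with hn | hn
    · subst hn
      rw [pvALoop.eq_def, dif_neg (by norm_num), pvBits.eq_def, dif_neg (by norm_num)]
    · have hb1 : PySem.Int.band 1 ((n : Nat) : Int) = ((n % 2 : Nat) : Int) := by
        rw [show (1 : Int) = ((1 : Nat) : Int) by norm_num, pvBandNat,
            Nat.one_and_eq_mod_two]
      rw [pvALoop.eq_def, dif_pos (by exact_mod_cast hn)]
      rw [hb1]
      simp only [pvShl1]
      simp only [show (2 * (1:Int)) = ((2*1 : Nat) : Int) by norm_num]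
      set m := n / 2 with hm
      rcases Nat.even_or_odd n with he | ho
      · obtain ⟨j, hj⟩ := he
        have hn2 : n = 2*m := by omega
        rw [if_neg (by rw [show n % 2 = 0 by omega]; simp)]
        rw [show ((n : Nat) : Int) = ((2*m+0 : Nat) : Int) by rw [← hn2]; norm_num]
        rw [pvALoop_double (m+1) m 1 0 (by omega) (by omega) _ (by norm_num)]
        simp only [show ((1 : Nat) : Int) = (1 : Int) by norm_num]
        rw [ih m (by omega) h1]
        rw [show ((2*m+0 : Nat) : Int) = ((2*m : Nat) : Int) by norm_num]
        rw [pvBits_double m]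
      · have hn2 : n = 2*m + 1 := by cases ho with | intro k hk => omega
        rw [if_pos (by rw [show n % 2 = 1 by omega]; norm_num)]
        rw [show ((n : Nat) : Int) = ((2*m+1 : Nat) : Int) by rw [← hn2]]
        rw [pvALoop_acc _ _ _ ([] ++ [(1 : Int)])]
        rw [pvALoop_double (m+1) m 1 1 (by omega) (by omega) _ (by norm_num)]
        simp only [show ((1 : Nat) : Int) = (1 : Int) by norm_num]
        rw [ih m (by omega) h1]
        rw [pvBits_odd m, pvBits_double m]
        simp

theorem pvBits_sorted (n : Nat) :
    (pvBits (n : Int) []).Pairwise (· < ·) ∧ ∀ x ∈ pvBits (n : Int) [], 1 ≤ x := by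
  induction n using Nat.strong_induction_on with
  | _ n ih =>
    rcases Nat.eq_zero_or_pos n with hn | hn
    · subst hn
      rw [pvBits.eq_def, dif_neg (by norm_num)]
      simp
    · set m := n / 2 with hm
      have hmlt : m < n := by omega
      rcases Nat.even_or_odd n with he | ho
      · obtain ⟨j, hj⟩ := he
        have hn2 : n = 2*m := by omega
        rw [show ((n : Nat) : Int) = ((2*m : Nat) : Int) by rw [← hn2]]
        rw [pvBits_double m]
        obtain ⟨hp, hpos⟩ := ih m hmlt
        refine ⟨(List.pairwise_map).mpr (hp.imp (by intro a b hab; omega)), ?_⟩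
        intro x hx
        obtain ⟨y, hy, rfl⟩ := List.mem_map.mp hx
        have := hpos y hy
        omega
      · obtain ⟨j, hj⟩ := ho
        have hn2 : n = 2*m + 1 := by omega
        rw [show ((n : Nat) : Int) = ((2*m+1 : Nat) : Int) by rw [← hn2]]
        rw [pvBits_odd m, pvBits_double m]
        obtain ⟨hp, hpos⟩ := ih m hmlt
        constructor
        · refine List.pairwise_cons.mpr ⟨?_, (List.pairwise_map).mpr (hp.imp (by intro a b hab; omega))⟩
          intro x hx
          obtain ⟨y, hy, rfl⟩ := List.mem_map.mp hx
          have := hpos y hy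
          omega
        · intro x hx
          rcases List.mem_cons.mp hx with rfl | hx'
          · omega
          · obtain ⟨y, hy, rfl⟩ := List.mem_map.mp hx'
            have := hpos y hy
            omega

-- log2 recurrences
theorem pvLog2_rec (m c : Nat) (hm : 1 ≤ m) (hc : c ≤ 1) :
    Nat.log2 (2*m+c) = Nat.log2 m + 1 := by
  rw [Nat.log2_eq_log_two, Nat.log2_eq_log_two]
  have hle := Nat.pow_log_le_self 2 (show m ≠ 0 by omega)
  have hlt := Nat.lt_pow_succ_log_self (show 1 < 2 by norm_num) m
  rw [Nat.succ_eq_add_one, pow_succ] at hlt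
  apply Nat.log_eq_of_pow_le_of_lt_pow
  · rw [pow_succ]; omega
  · rw [pow_succ, pow_succ]; omega

theorem pvLog2_one : Nat.log2 1 = 0 := by
  rw [Nat.log2_eq_log_two]; simp

-- the top set bit: 2^log2 n is the largest element of pvBits n and removing it drops the last entry
theorem pvBits_top (n : Nat) (hn : 0 < n) :
    2^(Nat.log2 n) ≤ n ∧ n - 2^(Nat.log2 n) < 2^(Nat.log2 n) ∧
    pvBits (n : Int) [] = pvBits ((n - 2^(Nat.log2 n) : Nat) : Int) [] ++ [((2^(Nat.log2 n) : Nat) : Int)] := by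
  induction n using Nat.strong_induction_on with
  | _ n ih =>
    rcases Nat.even_or_odd n with ⟨m, hmm⟩ | ⟨m, hmm⟩
    · have hn2 : n = 2*m := by omega
      subst hn2
      have hm1 : 1 ≤ m := by omega
      obtain ⟨h1, h2, h3⟩ := ih m (by omega) (by omega)
      have hlog : Nat.log2 (2*m) = Nat.log2 m + 1 := by
        simpa using pvLog2_rec m 0 hm1 (by omega)
      rw [hlog]
      refine ⟨by rw [pow_succ]; omega, by rw [pow_succ]; omega, ?_⟩
      rw [pvBits_double m, h3]
      rw [show 2*m - 2^(Nat.log2 m + 1) = 2*(m - 2^(Nat.log2 m)) by rw [pow_succ]; omega]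
      rw [pvBits_double (m - 2^(Nat.log2 m))]
      simp only [List.map_append, List.map_cons, List.map_nil]
      congr 2
      push_cast [pow_succ]
      ring
    · subst hmm
      rcases Nat.eq_zero_or_pos m with rfl | hm1
      · simp only [Nat.mul_zero, Nat.zero_add, pvLog2_one, pow_zero]
        refine ⟨le_rfl, by omega, ?_⟩
        have hcast1 : ((1 : Nat) : Int) = 1 := by norm_num
        have hcast0 : ((1 - 1 : Nat) : Int) = 0 := by norm_num
        rw [hcast1, hcast0]
        rw [pvBits.eq_def, dif_pos (by norm_num)]
        rw [show PySem.Int.band (1 : Int) ((1 : Int) - 1) = 0 from by decide]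
        rw [pvBits.eq_def, dif_neg (by norm_num)]
        rw [pvBits.eq_def, dif_neg (by norm_num)]
        norm_num
      · obtain ⟨h1, h2, h3⟩ := ih m (by omega) (by omega)
        have hlog : Nat.log2 (2*m+1) = Nat.log2 m + 1 := pvLog2_rec m 1 hm1 (by omega)
        rw [hlog]
        refine ⟨by rw [pow_succ]; omega, by rw [pow_succ]; omega, ?_⟩
        rw [pvBits_odd m, pvBits_double m, h3]
        rw [show 2*m + 1 - 2^(Nat.log2 m + 1) = 2*(m - 2^(Nat.log2 m)) + 1 by rw [pow_succ]; omega]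
        rw [pvBits_odd (m - 2^(Nat.log2 m)), pvBits_double (m - 2^(Nat.log2 m))]
        simp only [List.map_append, List.map_cons, List.map_nil, List.cons_append]
        congr 3
        push_cast [pow_succ]
        ring

-- B's loop computes: -1 if fewer than k set bits remain, else total + sum of the k largest
theorem pvBTake_eq (k : Nat) : ∀ (n : Nat) (total : Int),
    pvBTake k (n : Int) total =
      if (pvBits (n : Int) []).length < k then -1
      else total + ((pvBits (n : Int) []).reverse.take k).sum := by
  induction k with
  | zero =>
    intro n total
    simp [pvBTake]
  | succ k ih =>
    intro n total
    rcases Nat.eq_zero_or_pos n with hn | hn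
    · subst hn
      rw [show ((0 : Nat) : Int) = (0 : Int) from rfl]
      rw [pvBTake, if_pos (by norm_num)]
      rw [pvBits.eq_def, dif_neg (by norm_num)]
      simp
    · obtain ⟨h1, h2, h3⟩ := pvBits_top n hn
      rw [pvBTake, if_neg (by omega)]
      simp only [Int.toNat_natCast, Nat.add_sub_cancel, Nat.shiftLeft_eq, one_mul]
      rw [show ((n : Nat) : Int) - ((2^(Nat.log2 n) : Nat) : Int)
          = ((n - 2^(Nat.log2 n) : Nat) : Int) by rw [Nat.cast_sub h1]]
      rw [ih (n - 2^(Nat.log2 n)) (total + ((2^(Nat.log2 n) : Nat) : Int))]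
      rw [h3]
      simp only [List.length_append, List.length_cons, List.length_nil,
        List.reverse_append, List.reverse_cons, List.reverse_nil, List.nil_append,
        List.cons_append, List.take_succ_cons, List.sum_cons]
      by_cases hlen : (pvBits ((n - 2^(Nat.log2 n) : Nat) : Int) []).length < k
      · rw [if_pos hlen, if_pos (by omega)]
      · rw [if_neg hlen, if_neg (by omega)]
        ring

-- ===== VERDICT (by name: the statement is the Claim_ definition above) =====
theorem find_three_powers_of_two_spec : Claim_equal_find_three_powers_of_two := by
  intro a _
  unfold Spec_find_three_powers_of_two find_three_powers_of_two find_three_powers_of_two_alt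
  by_cases ha : 0 < a
  · obtain ⟨n, rfl⟩ : ∃ n : Nat, a = (n : Int) := ⟨a.toNat, by omega⟩
    rw [pvLoop_eq n, pvBTake_eq 3 n 0]
    set L := pvBits (n : Int) [] with hL
    obtain ⟨hpw, hpos⟩ := pvBits_sorted n
    by_cases hlen : L.length < 3
    · simp [hlen]
    · simp only [if_neg hlen]
      have hsort : PySem.List.sorted L (fun x => x) true = L.reverse := by
        apply PySem.List.sorted_rev_eq_of_perm_of_pairwise_gt
        · exact L.reverse_perm
        · exact (List.pairwise_reverse).mpr (by simpa using hpw)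
      rw [hsort, PySem.List.slice_to _ (by omega)]
      rw [show ((3 : Int).toNat) = 3 from rfl]
      omega
  · rw [pvALoop.eq_def, dif_neg (by omega)]
    simp only [List.length_nil]
    rw [if_pos (by norm_num)]
    rw [show pvBTake 3 a 0 = if a ≤ 0 then -1 else _ from rfl, if_pos (by omega)]
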